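-- pv_equiv track=rewrite | github.com/Ruales1138/Analisis-Y-Diseno-De-Algoritmos | recurcion_cola_no_cola/cadena.py | cadena_non_tail
-- ===== SOURCE A (Python) =====
-- def cadena_non_tail(matriz, i, j, direccion = None):
--     if direccion is None:
--         return 'Horizontal izquierda: ' + cadena_non_tail(matriz, i, j, True) + '\nVertical abajo: ' + cadena_non_tail(matriz, i, j, False)
--     if direccion is True:
--         if j == -1:
--             return ''
--         return matriz[i][j] + cadena_non_tail(matriz, i, j-1, True)
--     if direccion is False:
--         if i == len(matriz):
--             return ''
--         return matriz[i][j] + cadena_non_tail(matriz, i+1, j, False)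
-- ===== SOURCE B (Python) =====
-- def cadena_non_tail(matriz, i, j, direccion=None):
--     if direccion is None:
--         return ('Horizontal izquierda: ' + cadena_non_tail(matriz, i, j, True)
--                 + '\nVertical abajo: ' + cadena_non_tail(matriz, i, j, False))
--     if direccion is True:
--         return ''.join(matriz[i][k] for k in range(j, -1, -1))
--     if direccion is False:
--         return ''.join(matriz[k][j] for k in range(i, len(matriz)))
-- ===== Notes on version B (the rewrite author's own statement) =====
-- stated objective: idiomatic
-- what changed: Replaces A's non-tail recursion over shifting indices by a single ''.join over an explicit range() of indices (descending range(j,-1,-1) for the row walk, ascending range(i,len(matriz)) for the column walk).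
import Mathlib
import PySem

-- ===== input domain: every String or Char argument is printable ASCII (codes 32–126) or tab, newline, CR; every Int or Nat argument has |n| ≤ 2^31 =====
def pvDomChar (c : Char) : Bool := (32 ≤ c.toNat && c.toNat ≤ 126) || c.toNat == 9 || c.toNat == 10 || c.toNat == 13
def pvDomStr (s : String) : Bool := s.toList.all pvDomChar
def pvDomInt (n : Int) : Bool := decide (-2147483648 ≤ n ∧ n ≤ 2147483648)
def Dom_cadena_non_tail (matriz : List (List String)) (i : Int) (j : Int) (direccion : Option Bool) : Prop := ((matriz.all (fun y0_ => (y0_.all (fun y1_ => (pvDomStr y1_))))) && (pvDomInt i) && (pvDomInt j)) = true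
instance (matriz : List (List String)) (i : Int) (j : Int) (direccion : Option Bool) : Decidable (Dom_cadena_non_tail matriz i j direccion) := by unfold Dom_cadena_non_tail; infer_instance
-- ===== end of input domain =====

-- B replaces A's non-tail recursion over shifting indices by a single join over an
-- explicit index range (idiomatic rewrite; same value wherever A returns).

-- matriz[i][j] with Python indexing; the "" default is only reached where Python raises
-- IndexError, which Pre_ excludes.
def pvGet2 (matriz : List (List String)) (i j : Int) : String :=
  ((PySem.List.pyGet? matriz i).bind (fun r => PySem.List.pyGet? r j)).getD ""

-- ===== PORT A =====
-- A's True branch: 'if j == -1 then "" else matriz[i][j] + rec (j-1)', run on fuel (j+1).toNat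
-- (inside Pre_ the branch returns only for j ≥ -1, where the fuel is exact).
def pvGoTrueA (matriz : List (List String)) (i : Int) : Nat → String
  | 0 => ""
  | n + 1 => pvGet2 matriz i (n : Int) ++ pvGoTrueA matriz i n

-- A's False branch: 'if i == len then "" else matriz[i][j] + rec (i+1)', fuel (len - i).toNat.
def pvGoFalseA (matriz : List (List String)) (j : Int) : Int → Nat → String
  | _, 0 => ""
  | i, n + 1 => pvGet2 matriz i j ++ pvGoFalseA matriz j (i + 1) n

def cadena_non_tail (matriz : List (List String)) (i : Int) (j : Int) (direccion : Option Bool) : String :=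
  match direccion with
  | none =>
      "Horizontal izquierda: " ++ pvGoTrueA matriz i (j + 1).toNat
        ++ "\nVertical abajo: " ++ pvGoFalseA matriz j i ((matriz.length : Int) - i).toNat
  | some true => pvGoTrueA matriz i (j + 1).toNat
  | some false => pvGoFalseA matriz j i ((matriz.length : Int) - i).toNat

-- ===== PORT B =====
-- B's branches: ''.join(matriz[i][k] for k in range(j, -1, -1)) and
-- ''.join(matriz[k][j] for k in range(i, len(matriz))).
def cadena_non_tail_alt (matriz : List (List String)) (i : Int) (j : Int) (direccion : Option Bool) : String :=
  match direccion with
  | none =>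
      "Horizontal izquierda: "
        ++ String.join ((PySem.List.pyRange j (-1) (-1)).map (fun k => pvGet2 matriz i k))
        ++ "\nVertical abajo: "
        ++ String.join ((PySem.List.pyRange i matriz.length 1).map (fun k => pvGet2 matriz k j))
  | some true => String.join ((PySem.List.pyRange j (-1) (-1)).map (fun k => pvGet2 matriz i k))
  | some false => String.join ((PySem.List.pyRange i matriz.length 1).map (fun k => pvGet2 matriz k j))

-- ===== PRECONDITION & SPEC =====
-- Pre_ is exactly the set of inputs on which Python A returns (no IndexError): the True part
-- needs j = -1 or a valid (possibly negative, Python-wrapped) row index i with j < row length;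
-- the False part needs i = len or a valid start row i with j a valid Python index of every
-- row from i to the end.
def Pre_cadena_non_tail (matriz : List (List String)) (i : Int) (j : Int) (direccion : Option Bool) : Prop :=
  (direccion ≠ some false →
    j = -1 ∨ (0 ≤ j ∧ -(matriz.length : Int) ≤ i ∧ i < matriz.length ∧
      j < (((PySem.List.pyGet? matriz i).getD []).length : Int))) ∧
  (direccion ≠ some true →
    i = matriz.length ∨ (-(matriz.length : Int) ≤ i ∧ i < matriz.length ∧
      ∀ k ∈ PySem.List.pyRange i matriz.length 1,
        -((((PySem.List.pyGet? matriz k).getD []).length : Int)) ≤ j ∧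
          j < (((PySem.List.pyGet? matriz k).getD []).length : Int)))
instance (matriz : List (List String)) (i : Int) (j : Int) (direccion : Option Bool) : Decidable (Pre_cadena_non_tail matriz i j direccion) := by unfold Pre_cadena_non_tail; infer_instance

def pvWitness_cadena_non_tail : List (List String) × Int × Int × Option Bool :=
  ([["a", "b"], ["c", "d"]], 0, 1, none)

def Spec_cadena_non_tail (matriz : List (List String)) (i : Int) (j : Int) (direccion : Option Bool) (out : String) : Prop := out = cadena_non_tail_alt matriz i j direccion
instance (matriz : List (List String)) (i : Int) (j : Int) (direccion : Option Bool) (out : String) : Decidable (Spec_cadena_non_tail matriz i j direccion out) := by unfold Spec_cadena_non_tail; infer_instance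

-- ===== CLAIM =====
def Claim_equal_cadena_non_tail : Prop := ∀ (matriz : List (List String)) (i : Int) (j : Int) (direccion : Option Bool), Dom_cadena_non_tail matriz i j direccion → Pre_cadena_non_tail matriz i j direccion → Spec_cadena_non_tail matriz i j direccion (cadena_non_tail matriz i j direccion)

-- ===== LEMMAS AND PROOFS =====
theorem pvJoin_cons (a : String) (l : List String) :
    String.join (a :: l) = a ++ String.join l := by
  suffices h : ∀ (l : List String) (a : String),
      List.foldl (fun r s => r ++ s) a l = a ++ List.foldl (fun r s => r ++ s) "" l by
    simpa [String.join] using h l a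
  intro l
  induction l with
  | nil => intro a; simp
  | cons x xs ih =>
      intro a
      simp only [List.foldl_cons]
      rw [ih (a ++ x), ih ("" ++ x)]
      simp [String.append_assoc]

theorem pvJoinTrue (matriz : List (List String)) (i : Int) :
    ∀ (n : Nat),
      String.join ((PySem.List.pyRange ((n : Int) - 1) (-1) (-1)).map (fun k => pvGet2 matriz i k))
        = pvGoTrueA matriz i n := by
  intro n
  induction n with
  | zero =>
      rw [PySem.List.pyRange_neg_one_eq_nil (by norm_num)]
      simp [pvGoTrueA, String.join]
  | succ n ih =>
      rw [show ((n + 1 : Nat) : Int) - 1 = (n : Int) by push_cast; ring,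
        PySem.List.pyRange_neg_one_cons (by omega)]
      rw [List.map_cons, pvJoin_cons, ih]
      simp [pvGoTrueA]

theorem joinTrue_eq (matriz : List (List String)) (i : Int) (j : Int) :
    String.join ((PySem.List.pyRange j (-1) (-1)).map (fun k => pvGet2 matriz i k))
      = pvGoTrueA matriz i (j + 1).toNat := by
  by_cases h : -1 ≤ j
  · have hj : ((j + 1).toNat : Int) - 1 = j := by omega
    have h2 := pvJoinTrue matriz i (j + 1).toNat
    rwa [hj] at h2
  · have h0 : (j + 1).toNat = 0 := by omega
    rw [h0, PySem.List.pyRange_neg_one_eq_nil (by omega)]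
    simp [pvGoTrueA, String.join]

theorem pvJoinFalse (matriz : List (List String)) (j : Int) :
    ∀ (n : Nat) (k : Int),
      String.join ((PySem.List.pyRange k (k + (n : Int)) 1).map (fun r => pvGet2 matriz r j))
        = pvGoFalseA matriz j k n := by
  intro n
  induction n with
  | zero =>
      intro k
      rw [PySem.List.pyRange_one_eq_nil (by omega)]
      simp [pvGoFalseA, String.join]
  | succ n ih =>
      intro k
      rw [show k + ((n + 1 : Nat) : Int) = k + 1 + (n : Int) by push_cast; ring,
        PySem.List.pyRange_one_cons (by omega)]
      rw [List.map_cons, pvJoin_cons, ih (k + 1)]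
      simp [pvGoFalseA]

theorem joinFalse_eq (matriz : List (List String)) (j : Int) (i : Int) :
    String.join ((PySem.List.pyRange i matriz.length 1).map (fun k => pvGet2 matriz k j))
      = pvGoFalseA matriz j i ((matriz.length : Int) - i).toNat := by
  by_cases h : i ≤ (matriz.length : Int)
  · have hj : i + ((((matriz.length : Int) - i).toNat : Int)) = matriz.length := by omega
    have h2 := pvJoinFalse matriz j (((matriz.length : Int) - i).toNat) i
    rwa [hj] at h2
  · have h0 : ((matriz.length : Int) - i).toNat = 0 := by omega
    rw [h0, PySem.List.pyRange_one_eq_nil (by omega)]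
    simp [pvGoFalseA, String.join]

-- ===== VERDICT =====
theorem cadena_non_tail_spec : Claim_equal_cadena_non_tail := by
  intro matriz i j direccion _ _
  unfold Spec_cadena_non_tail cadena_non_tail cadena_non_tail_alt
  cases direccion with
  | none => simp [joinTrue_eq, joinFalse_eq]
  | some b => cases b <;> simp [joinTrue_eq, joinFalse_eq]
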